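-- pv_equiv track=rewrite | github.com/GraduationP/Bio-Project | shifts.py | count_alignments_and_shifts
-- ===== SOURCE A (Python) =====
-- def count_alignments_and_shifts(text, subsequence):
--     alignments = 0
--     shifts = 1
--
--     # Iterate through the text
--     for i in range(len(text) - len(subsequence) + 1):
--         match = True
--
--         # Check if the subsequence matches the current substring of the text
--         for j in range(len(subsequence)):
--             if text[i + j] != subsequence[j]:
--                 match = False
--                 break
--
--         # If a match is found, increment alignments
--         if match:
--             alignments += 1
--
--         # If the match starts at a position greater than 0, increment shifts
--         if i > 0:
--             shifts += 1
--
--     return f"Number of alignments: {alignments}, Number of shifts needed: {shifts}"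
-- ===== SOURCE B (Python) =====
-- def count_alignments_and_shifts(text, subsequence):
--     # shifts in closed form; alignments by jumping between occurrences with str.find
--     k = len(text) - len(subsequence) + 1
--     shifts = k if k > 1 else 1
--     alignments = 0
--     pos = text.find(subsequence)
--     while pos != -1:
--         alignments += 1
--         pos = text.find(subsequence, pos + 1)
--     return f"Number of alignments: {alignments}, Number of shifts needed: {shifts}"
-- ===== Notes on version B (the rewrite author's own statement) =====
-- stated objective: faster
-- what changed: B replaces A's scan of every alignment with nested character-comparison loops by a closed-form shift count (k if k > 1 else 1) and a loop that jumps directly from one occurrence to the next with str.find(subsequence, pos+1), so the Python-level loop runs once per match instead of once per position with an inner loop.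
import Mathlib
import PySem

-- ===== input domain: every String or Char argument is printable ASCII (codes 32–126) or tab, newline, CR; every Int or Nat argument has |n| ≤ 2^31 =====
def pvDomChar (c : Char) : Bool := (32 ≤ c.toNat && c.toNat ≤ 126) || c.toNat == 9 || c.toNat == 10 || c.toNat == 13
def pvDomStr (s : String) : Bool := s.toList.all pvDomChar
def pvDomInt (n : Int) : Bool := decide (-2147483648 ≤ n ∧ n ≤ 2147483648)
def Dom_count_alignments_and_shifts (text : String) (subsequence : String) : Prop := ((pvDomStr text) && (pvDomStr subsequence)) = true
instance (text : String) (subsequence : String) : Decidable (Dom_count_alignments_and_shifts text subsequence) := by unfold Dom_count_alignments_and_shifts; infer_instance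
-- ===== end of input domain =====

-- B replaces A's position-by-position nested comparison loops by a closed-form shift
-- count and a loop over the occurrences themselves, jumping with str.find.

-- ===== PORT A =====
-- Literal port of A. Inner `for j ... if text[i+j] != subsequence[j]: match=False; break`
-- is folded with `match` as the Bool state; `break` only short-circuits and never changes
-- the final value of `match` (once false it stays false), so the fold is exact.
-- text[i+j] and subsequence[j] are always in range here (0 ≤ i+j < len text, 0 ≤ j < len
-- subsequence), so pyGetD with a default character is exact (no IndexError possible).
def count_alignments_and_shifts (text : String) (subsequence : String) : String :=
  let t := text.toList
  let p := subsequence.toList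
  let st := (PySem.List.pyRange 0 ((t.length : Int) - (p.length : Int) + 1) 1).foldl
    (fun (st : Int × Int) i =>
      let mtch := (PySem.List.pyRange 0 (p.length : Int) 1).foldl
        (fun m j => if PySem.List.pyGetD t (i + j) ' ' ≠ PySem.List.pyGetD p j ' '
                    then false else m) true
      (if mtch then st.1 + 1 else st.1, if i > 0 then st.2 + 1 else st.2))
    ((0 : Int), (1 : Int))
  "Number of alignments: " ++ PySem.Int.toStr st.1
    ++ ", Number of shifts needed: " ++ PySem.Int.toStr st.2

-- ===== PORT B =====
-- Port of Source B's `while pos != -1: alignments += 1; pos = text.find(subsequence, pos+1)`.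
-- The fuel argument only makes the recursion structural: each found position is at most
-- len(text), so fuel len(text)+2 is never exhausted (proved in the lemmas below).
def pvFindLoop (t p : List Char) : Nat → Int → Int → Int
  | 0, alignments, _ => alignments
  | fuel + 1, alignments, pos =>
    if pos = -1 then alignments
    else pvFindLoop t p fuel (alignments + 1) (PySem.Chars.findFrom t p (pos + 1) none)

def count_alignments_and_shifts_alt (text : String) (subsequence : String) : String :=
  let t := text.toList
  let p := subsequence.toList
  let k : Int := (t.length : Int) - (p.length : Int) + 1
  let shifts : Int := if k > 1 then k else 1
  let alignments : Int := pvFindLoop t p (t.length + 2) 0 (PySem.Chars.find t p)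
  "Number of alignments: " ++ PySem.Int.toStr alignments
    ++ ", Number of shifts needed: " ++ PySem.Int.toStr shifts

-- ===== PRECONDITION & SPEC =====
def Spec_count_alignments_and_shifts (text : String) (subsequence : String) (out : String) : Prop := out = count_alignments_and_shifts_alt text subsequence
instance (text : String) (subsequence : String) (out : String) : Decidable (Spec_count_alignments_and_shifts text subsequence out) := by unfold Spec_count_alignments_and_shifts; infer_instance

-- ===== CLAIM (what is proved, stated in full; the proofs are below) =====
def Claim_equal_count_alignments_and_shifts : Prop := ∀ (text : String) (subsequence : String), Dom_count_alignments_and_shifts text subsequence → Spec_count_alignments_and_shifts text subsequence (count_alignments_and_shifts text subsequence)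

-- ===== LEMMAS AND PROOFS =====

-- A's inner loop is a Bool-and fold.
theorem pv_foldl_and {α : Type} (f : α → Bool) (l : List α) (b : Bool) :
    l.foldl (fun m x => m && f x) b = (b && l.all f) := by
  induction l generalizing b with
  | nil => simp
  | cons x xs ih => simp [List.all_cons, ih, Bool.and_assoc]

-- The inner match test of A is the prefix test, for any position the outer loop visits.
theorem pv_match_eq_prefix (t p : List Char) (i : Int) (h0 : 0 ≤ i)
    (hk : i < (t.length : Int) - (p.length : Int) + 1) :
    ((PySem.List.pyRange 0 (p.length : Int) 1).foldl
        (fun m j => if PySem.List.pyGetD t (i + j) ' ' ≠ PySem.List.pyGetD p j ' '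
                    then false else m) true)
      = decide (p <+: t.drop i.toNat) := by
  have hfun : (fun (m : Bool) (j : Int) =>
      if PySem.List.pyGetD t (i + j) ' ' ≠ PySem.List.pyGetD p j ' ' then false else m)
      = fun m j => m && (PySem.List.pyGetD t (i + j) ' ' == PySem.List.pyGetD p j ' ') := by
    funext m j
    by_cases h : PySem.List.pyGetD t (i + j) ' ' = PySem.List.pyGetD p j ' ' <;> simp [h]
  rw [hfun, pv_foldl_and, Bool.true_and]
  have hlen : i.toNat + p.length ≤ t.length := by omega
  apply Bool.coe_iff_coe.mp
  rw [List.all_eq_true, decide_eq_true_eq, List.prefix_iff_getElem]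
  constructor
  · intro hall
    refine ⟨by simp; omega, fun j hj => ?_⟩
    have hmem : (j : Int) ∈ PySem.List.pyRange 0 (p.length : Int) 1 := by
      rw [PySem.List.mem_pyRange_one]; omega
    have heq := hall _ hmem
    rw [beq_iff_eq,
        PySem.List.pyGetD_eq_getElem t ' ' (by omega) (by omega),
        PySem.List.pyGetD_eq_getElem p ' ' (by omega) (by omega)] at heq
    rw [List.getElem_drop]
    have hidx : (i + (j : Int)).toNat = i.toNat + j := by omega
    have hjdx : ((j : Int)).toNat = j := by omega
    simp only [hidx, hjdx] at heq
    exact heq.symm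
  · rintro ⟨hle, hpre⟩ j hj
    rw [PySem.List.mem_pyRange_one] at hj
    rw [beq_iff_eq,
        PySem.List.pyGetD_eq_getElem t ' ' (by omega) (by omega),
        PySem.List.pyGetD_eq_getElem p ' ' (by omega) (by omega)]
    have hjl : j.toNat < p.length := by omega
    have heq := hpre j.toNat hjl
    rw [List.getElem_drop] at heq
    have hidx : i.toNat + j.toNat = (i + j).toNat := by omega
    simp only [hidx] at heq
    exact heq.symm

-- A's shift accumulator computes `if k > 1 then k else 1`.
theorem pv_shifts (k : Int) :
    (PySem.List.pyRange 0 k 1).foldl (fun sh i => if i > 0 then sh + 1 else sh) 1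
      = if k > 1 then k else 1 := by
  by_cases h : k ≤ 0
  · rw [PySem.List.pyRange_one_eq_nil (by omega)]
    simp; omega
  · rw [PySem.List.pyRange_one_cons (by omega), List.foldl_cons,
        if_neg (by omega : ¬((0:Int) > 0))]
    have hfun : (fun (sh : Int) (i : Int) => if i > 0 then sh + 1 else sh)
        = fun sh i => if (0 < i : Bool) = true then sh + 1 else sh := by
      funext sh i; simp [decide_eq_true_eq]
    rw [hfun, PySem.List.foldl_count_if]
    have hc : List.countP (fun i => (0 < i : Bool)) (PySem.List.pyRange (0 + 1) k 1)
        = (PySem.List.pyRange (0 + 1) k 1).length := by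
      rw [List.countP_eq_length]
      intro x hx
      rw [PySem.List.mem_pyRange_one] at hx
      simp; omega
    rw [hc, PySem.List.length_pyRange_one]
    omega

-- a match anywhere at or after `start` makes p an infix of the suffix at `start`
theorem pv_infix_of_prefix_drop (t p : List Char) (start j : Nat) (hsj : start ≤ j)
    (h : p <+: t.drop j) : p <:+: t.drop start := by
  have hd : t.drop j = (t.drop start).drop (j - start) := by
    rw [List.drop_drop]; congr 1; omega
  rw [hd] at h
  exact h.isInfix.trans (List.drop_suffix _ _).isInfix

-- B's find-jump loop counts exactly the match positions in [start, len t].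
theorem pv_loop_count (t p : List Char) (fuel : Nat) :
    ∀ (start : Nat) (acc : Int), start ≤ t.length + 1 → t.length + 1 - start < fuel →
    pvFindLoop t p fuel acc (PySem.Chars.findFrom t p (start : Int) none)
      = acc + ((List.range' start (t.length + 1 - start)).countP
                (fun j => decide (p <+: t.drop j)) : Int) := by
  induction fuel with
  | zero => intro start acc h hf; omega
  | succ fuel ih =>
    intro start acc h hf
    by_cases hend : start = t.length + 1
    · -- start past the end: findFrom is -1 (CPython quirk), nothing to count
      have hm : PySem.Chars.findFrom t p (start : Int) none = -1 := by
        simp only [PySem.Chars.findFrom]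
        split_ifs with h1 h2 h3 <;> first | rfl | omega
      rw [hm]
      simp [pvFindLoop, hend]
    · have hle : start ≤ t.length := by omega
      rw [PySem.Chars.findFrom_natCast t p start hle]
      set r := PySem.Chars.find (t.drop start) p with hr
      by_cases hneg : r = -1
      · -- no further occurrence: loop stops, and no position ≥ start matches
        rw [if_pos hneg]
        have hno : ¬ p <:+: t.drop start := (PySem.Chars.find_eq_neg_one_iff _ _).mp hneg
        have hz : (List.range' start (t.length + 1 - start)).countP
            (fun j => decide (p <+: t.drop j)) = 0 := by
          rw [List.countP_eq_zero]
          intro j hj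
          simp only [decide_eq_true_eq]
          intro hpre
          rw [List.mem_range'_1] at hj
          exact hno (pv_infix_of_prefix_drop t p start j hj.1 hpre)
        rw [hz]
        simp [pvFindLoop]
      · -- an occurrence at position start + r: count it and continue after it
        rw [if_neg hneg]
        have hr0 : 0 ≤ r := by have := PySem.Chars.neg_one_le_find (t.drop start) p; omega
        have hrl : r ≤ ((t.drop start).length : Int) := PySem.Chars.find_le_length _ _
        have hdl : (t.drop start).length = t.length - start := by simp
        obtain ⟨hat, hbefore⟩ := PySem.Chars.find_spec (s := t.drop start) (sub := p) hr0
        rw [← hr] at hat hbefore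
        set pos := start + r.toNat with hposdef
        have hposle : pos ≤ t.length := by omega
        have hstep : ((start : Int) + r) + 1 = ((pos + 1 : Nat) : Int) := by
          rw [hposdef]; omega
        simp only [pvFindLoop, if_neg (by omega : ¬ (start : Int) + r = -1)]
        rw [hstep, ih (pos + 1) (acc + 1) (by omega) (by omega)]
        -- split [start, len t] into [start, pos), {pos}, (pos, len t]
        have hsplit : List.range' start (t.length + 1 - start)
            = List.range' start r.toNat ++ (pos :: List.range' (pos + 1) (t.length - pos)) := by
          have h2 : pos :: List.range' (pos + 1) (t.length - pos)
              = List.range' pos (t.length - pos + 1) := by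
            rw [List.range'_succ]
          rw [h2]
          have h3 := List.range'_append (s := start) (m := r.toNat)
            (n := t.length - pos + 1) (step := 1)
          simp only [one_mul] at h3
          rw [← hposdef] at h3
          rw [h3]
          congr 1
          omega
        have hatp : p <+: t.drop pos := by
          have hd : t.drop pos = (t.drop start).drop r.toNat := by
            rw [List.drop_drop]
          rw [hd]; exact hat
        have hz : (List.range' start r.toNat).countP (fun j => decide (p <+: t.drop j)) = 0 := by
          rw [List.countP_eq_zero]
          intro j hj
          rw [List.mem_range'_1] at hj
          simp only [decide_eq_true_eq]
          intro hpre
          have hd : t.drop j = (t.drop start).drop (j - start) := by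
            rw [List.drop_drop]; congr 1; omega
          exact hbefore (j - start) (by omega) (hd ▸ hpre)
        rw [hsplit, List.countP_append, List.countP_cons, hz,
            if_pos (by simpa using hatp)]
        have hll : t.length + 1 - (pos + 1) = t.length - pos := by omega
        rw [hll]
        push_cast
        ring

-- A's alignment count over [0, k) equals the match count over [0, len t].
theorem pv_countA_eq (t p : List Char) :
    (PySem.List.pyRange 0 ((t.length : Int) - (p.length : Int) + 1) 1).countP
        (fun i => decide (p <+: t.drop i.toNat))
      = (List.range' 0 (t.length + 1)).countP (fun j => decide (p <+: t.drop j)) := by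
  set k : Int := (t.length : Int) - (p.length : Int) + 1 with hk
  by_cases h : k ≤ 0
  · rw [PySem.List.pyRange_one_eq_nil h]
    have hz : (List.range' 0 (t.length + 1)).countP (fun j => decide (p <+: t.drop j)) = 0 := by
      rw [List.countP_eq_zero]
      intro j hj
      rw [List.mem_range'_1] at hj
      simp only [decide_eq_true_eq]
      intro hpre
      have hl := hpre.length_le
      rw [List.length_drop] at hl
      omega
    rw [hz]
    rfl
  · obtain ⟨kn, hkn⟩ : ∃ kn : Nat, k = (kn : Int) := ⟨k.toNat, by omega⟩
    rw [hkn, PySem.List.pyRange_zero_natCast, List.countP_map]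
    have hfn : ((fun i : Int => decide (p <+: t.drop i.toNat)) ∘ (fun n : Nat => (n : Int)))
        = fun j : Nat => decide (p <+: t.drop j) := by
      funext j; simp
    rw [hfn, List.range_eq_range']
    have hsplit : List.range' 0 (t.length + 1)
        = List.range' 0 kn ++ List.range' kn (t.length + 1 - kn) := by
      have h3 := List.range'_append (s := 0) (m := kn)
        (n := t.length + 1 - kn) (step := 1)
      simp only [one_mul, zero_add] at h3
      rw [h3]
      congr 1
      omega
    rw [hsplit, List.countP_append]
    have hz : (List.range' kn (t.length + 1 - kn)).countP
        (fun j => decide (p <+: t.drop j)) = 0 := by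
      rw [List.countP_eq_zero]
      intro j hj
      rw [List.mem_range'_1] at hj
      simp only [decide_eq_true_eq]
      intro hpre
      have hl := hpre.length_le
      rw [List.length_drop] at hl
      omega
    rw [hz]
    omega

-- ===== VERDICT (by name: the statement is the Claim_ definition above) =====
theorem count_alignments_and_shifts_spec : Claim_equal_count_alignments_and_shifts := by
  intro text subsequence _
  show count_alignments_and_shifts text subsequence = count_alignments_and_shifts_alt text subsequence
  simp only [count_alignments_and_shifts, count_alignments_and_shifts_alt]
  set t := text.toList
  set p := subsequence.toList
  set k : Int := (t.length : Int) - (p.length : Int) + 1 with hk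
  rw [PySem.List.foldl_prod_mk
        (fun al i => if (PySem.List.pyRange 0 (p.length : Int) 1).foldl
            (fun m j => if PySem.List.pyGetD t (i + j) ' ' ≠ PySem.List.pyGetD p j ' '
                        then false else m) true = true
          then al + 1 else al)
        (fun sh i => if i > 0 then sh + 1 else sh)]
  have hal : (PySem.List.pyRange 0 k 1).foldl
      (fun al i => if (PySem.List.pyRange 0 (p.length : Int) 1).foldl
          (fun m j => if PySem.List.pyGetD t (i + j) ' ' ≠ PySem.List.pyGetD p j ' '
                      then false else m) true
        then al + 1 else al) 0
      = pvFindLoop t p (t.length + 2) 0 (PySem.Chars.find t p) := by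
    rw [PySem.List.foldl_count_if, zero_add]
    have hc : List.countP (fun i => (PySem.List.pyRange 0 ((p.length : Int)) 1).foldl
          (fun m j => if PySem.List.pyGetD t (i + j) ' ' ≠ PySem.List.pyGetD p j ' '
                      then false else m) true) (PySem.List.pyRange 0 k 1)
        = List.countP (fun i : Int => decide (p <+: t.drop i.toNat))
            (PySem.List.pyRange 0 k 1) := by
      apply List.countP_congr
      intro i hi
      rw [PySem.List.mem_pyRange_one] at hi
      rw [pv_match_eq_prefix t p i hi.1 hi.2]
    rw [hc, pv_countA_eq t p]
    rw [← PySem.Chars.findFrom_zero t p]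
    have hl := pv_loop_count t p (t.length + 2) 0 0 (by omega) (by omega)
    rw [Nat.cast_zero, Nat.sub_zero, zero_add] at hl
    rw [hl]
  rw [hal, pv_shifts k]
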